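-- pv_equiv track=rewrite | github.com/7h3v01d/PatchStudioPro | src/patchstudio/ui/delegates.py | _find_string_spans
-- ===== SOURCE A (Python) =====
-- from typing import List, Tuple
--
-- def _find_string_spans(s: str, kind: str) -> List[Tuple[int, int, str]]:
--     spans: List[Tuple[int, int, str]] = []
--     i = 0
--     while i < len(s):
--         ch = s[i]
--         if ch in ("'", '"'):
--             q = ch
--             j = i + 1
--             esc = False
--             while j < len(s):
--                 cj = s[j]
--                 if esc:
--                     esc = False
--                     j += 1
--                     continue
--                 if cj == "\\":
--                     esc = True
--                     j += 1
--                     continue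
--                 if cj == q:
--                     spans.append((i, j + 1, kind))
--                     i = j + 1
--                     break
--                 j += 1
--             else:
--                 # unterminated; still mark to end
--                 spans.append((i, len(s), kind))
--                 i = len(s)
--         else:
--             i += 1
--     return spans
-- ===== SOURCE B (Python) =====
-- from typing import List, Tuple
--
-- def _find_string_spans(s: str, kind: str) -> List[Tuple[int, int, str]]:
--     spans: List[Tuple[int, int, str]] = []
--     start = 0
--     q = '"'
--     in_string = False
--     esc = False
--     for k, ch in enumerate(s):
--         if not in_string:
--             if ch in ("'", '"'):
--                 in_string = True
--                 q = ch
--                 start = k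
--                 esc = False
--         elif esc:
--             esc = False
--         elif ch == "\\":
--             esc = True
--         elif ch == q:
--             spans.append((start, k + 1, kind))
--             in_string = False
--     if in_string:
--         spans.append((start, len(s), kind))
--     return spans
-- ===== Notes on version B (the rewrite author's own statement) =====
-- stated objective: alternative
-- what changed: Replaces the nested while-loops (outer index scan restarting an inner scan-for-close per quote) with one flat single pass over enumerate(s) maintaining explicit state (in_string, quote char, start index, escape flag), emitting unterminated spans after the loop.
import Mathlib
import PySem

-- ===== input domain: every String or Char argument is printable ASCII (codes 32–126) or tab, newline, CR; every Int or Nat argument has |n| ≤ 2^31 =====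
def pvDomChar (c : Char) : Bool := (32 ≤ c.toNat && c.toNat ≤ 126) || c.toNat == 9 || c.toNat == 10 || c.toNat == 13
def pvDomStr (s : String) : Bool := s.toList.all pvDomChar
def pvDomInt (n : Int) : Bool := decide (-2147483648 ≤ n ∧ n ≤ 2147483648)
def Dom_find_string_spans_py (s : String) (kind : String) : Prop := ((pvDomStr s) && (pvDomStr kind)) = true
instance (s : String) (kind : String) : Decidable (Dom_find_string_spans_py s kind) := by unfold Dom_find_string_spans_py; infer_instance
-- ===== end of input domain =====

-- B replaces A's nested while-loops by one flat single-pass state machine; same O(n) cost (objective: alternative).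

-- ===== PORT A =====
-- inner 'while j < len(s)' loop of A: scans the suffix after the opening quote at position i.
-- Returns 'some (j+1, suffix after the close quote)' when the closing quote is found,
-- 'none' when the loop runs off the end (Python's 'else' branch: unterminated string).
def pvAInner (j : Int) (rest : List Char) (q : Char) (esc : Bool) : Option (Int × List Char) :=
  match rest with
  | [] => none
  | cj :: rs =>
    if esc then pvAInner (j + 1) rs q false
    else if cj = '\\' then pvAInner (j + 1) rs q true
    else if cj = q then some (j + 1, rs)
    else pvAInner (j + 1) rs q esc

theorem pvAInner_length (j : Int) (rest : List Char) (q : Char) (esc : Bool)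
    (i' : Int) (rest' : List Char) (h : pvAInner j rest q esc = some (i', rest')) :
    rest'.length < rest.length := by
  induction rest generalizing j esc with
  | nil => simp [pvAInner] at h
  | cons c rs ih =>
    simp only [pvAInner] at h
    split_ifs at h with h1 h2 h3
    · exact Nat.lt_succ_of_lt (ih _ _ h)
    · exact Nat.lt_succ_of_lt (ih _ _ h)
    · cases h; simp
    · exact Nat.lt_succ_of_lt (ih _ _ h)

-- outer 'while i < len(s)' loop of A; 'spans' is the accumulated list, 'i' the current index,
-- 'rest' the suffix of s starting at i (so len(s) = i + 1 + rs.length inside the quote branch).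
def pvAOuter (kind : String) (spans : List (Int × Int × String)) (i : Int) (rest : List Char) :
    List (Int × Int × String) :=
  match rest with
  | [] => spans
  | ch :: rs =>
    if ch = '\'' ∨ ch = '"' then
      match h : pvAInner (i + 1) rs ch false with
      | some (i', rest') => pvAOuter kind (spans ++ [(i, i', kind)]) i' rest'
      | none => spans ++ [(i, i + 1 + (rs.length : Int), kind)]
    else
      pvAOuter kind spans (i + 1) rs
termination_by rest.length
decreasing_by
  exact Nat.lt_succ_of_lt (pvAInner_length _ _ _ _ _ _ h)
  exact Nat.lt_succ_self _

def find_string_spans_py (s : String) (kind : String) : List (Int × Int × String) :=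
  pvAOuter kind [] 0 s.toList

-- ===== PORT B =====
-- B's single 'for k, ch in enumerate(s)' loop: k is the current index, 'rest' the remaining
-- characters; state = (spans, start, q, in_string, esc); after the loop the unterminated span.
def pvBLoop (kind : String) (k : Int) (rest : List Char) (spans : List (Int × Int × String))
    (start : Int) (q : Char) (inString : Bool) (esc : Bool) : List (Int × Int × String) :=
  match rest with
  | [] => if inString then spans ++ [(start, k, kind)] else spans
  | ch :: rs =>
    if !inString then
      if ch = '\'' ∨ ch = '"' then
        pvBLoop kind (k + 1) rs spans k ch true false
      else
        pvBLoop kind (k + 1) rs spans start q false esc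
    else if esc then
      pvBLoop kind (k + 1) rs spans start q true false
    else if ch = '\\' then
      pvBLoop kind (k + 1) rs spans start q true true
    else if ch = q then
      pvBLoop kind (k + 1) rs (spans ++ [(start, k + 1, kind)]) start q false esc
    else
      pvBLoop kind (k + 1) rs spans start q true esc

def find_string_spans_py_alt (s : String) (kind : String) : List (Int × Int × String) :=
  pvBLoop kind 0 s.toList [] 0 '"' false false

-- ===== PRECONDITION & SPEC =====
def Spec_find_string_spans_py (s : String) (kind : String) (out : List (Int × Int × String)) : Prop := out = find_string_spans_py_alt s kind
instance (s : String) (kind : String) (out : List (Int × Int × String)) : Decidable (Spec_find_string_spans_py s kind out) := by unfold Spec_find_string_spans_py; infer_instance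

-- ===== CLAIM (what is proved, stated in full; the proofs are below) =====
def Claim_equal_find_string_spans_py : Prop := ∀ (s : String) (kind : String), Dom_find_string_spans_py s kind → Spec_find_string_spans_py s kind (find_string_spans_py s kind)

-- ===== LEMMAS AND PROOFS =====

-- B's in-string state simulates A's inner scan.
theorem pvB_in_string (kind : String) (rest : List Char) (k : Int)
    (spans : List (Int × Int × String)) (start : Int) (q : Char) (esc : Bool) :
    pvBLoop kind k rest spans start q true esc =
      (match pvAInner k rest q esc with
       | some (i', rest') => pvBLoop kind i' rest' (spans ++ [(start, i', kind)]) start q false false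
       | none => spans ++ [(start, k + (rest.length : Int), kind)]) := by
  induction rest generalizing k esc spans with
  | nil => simp [pvBLoop, pvAInner]
  | cons c rs ih =>
    by_cases he : esc = true
    · subst he
      simp only [pvBLoop, pvAInner, Bool.not_true, if_true, Bool.false_eq_true, if_false]
      rw [ih]
      cases h : pvAInner (k + 1) rs q false with
      | some p => simp [h]
      | none => simp [h]; push_cast; ring_nf
    · simp only [Bool.not_eq_true] at he
      subst he
      simp only [pvBLoop, pvAInner, Bool.not_true, if_true, Bool.false_eq_true, if_false]
      by_cases h2 : c = '\\'
      · simp only [h2, if_pos rfl]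
        rw [ih]
        cases h : pvAInner (k + 1) rs q true with
        | some p => simp [h]
        | none => simp [h]; push_cast; ring_nf
      · simp only [if_neg h2]
        by_cases h3 : c = q
        · simp [h3]
        · simp only [if_neg h3]
          rw [ih]
          cases h : pvAInner (k + 1) rs q false with
          | some p => simp [h]
          | none => simp [h]; push_cast; ring_nf

-- B's not-in-string state simulates A's outer loop (for any leftover start/q/esc state).
theorem pvAB (kind : String) (rest : List Char) (i : Int)
    (spans : List (Int × Int × String)) (start : Int) (q : Char) (esc : Bool) :
    pvAOuter kind spans i rest = pvBLoop kind i rest spans start q false esc := by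
  match rest with
  | [] => simp [pvAOuter, pvBLoop]
  | ch :: rs =>
    simp only [pvAOuter, pvBLoop, Bool.not_false, if_true]
    split_ifs with h1
    · rw [pvB_in_string]
      cases h : pvAInner (i + 1) rs ch false with
      | some p =>
        obtain ⟨i', rest'⟩ := p
        have hlt := pvAInner_length _ _ _ _ _ _ h
        simp only []
        exact pvAB kind rest' i' (spans ++ [(i, i', kind)]) i ch false
      | none =>
        simp only [h, List.length_cons]
        try (push_cast; ring_nf)
    · exact pvAB kind rs (i + 1) spans start q esc
termination_by rest.length
decreasing_by
  all_goals simp only [List.length_cons]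
  all_goals omega

-- ===== VERDICT (by name: the statement is the Claim_ definition above) =====
theorem find_string_spans_py_spec : Claim_equal_find_string_spans_py := by
  intro s kind _
  unfold Spec_find_string_spans_py find_string_spans_py find_string_spans_py_alt
  exact pvAB kind s.toList 0 [] 0 '"' false
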